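-- pv_equiv track=rewrite | github.com/regispha-hue/visadocs-360-mvp | pops_rag/pop_semantic_index.py | _generate_content_snippet
-- ===== SOURCE A (Python) =====
-- def _generate_content_snippet(query: str, content: str, max_length: int = 200) -> str:
--     """Gera snippet do conteúdo destacando termos da query"""
--     query_words = [word.lower() for word in query.split()]
--     content_lower = content.lower()
--
--     # Encontrar melhor snippet
--     best_start = 0
--     best_score = 0
--
--     for i in range(len(content) - max_length):
--         snippet = content[i:i + max_length]
--         snippet_lower = snippet.lower()
--
--         # Calcular score do snippet
--         score = sum(1 for word in query_words if word in snippet_lower)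
--
--         if score > best_score:
--             best_score = score
--             best_start = i
--
--     # Extrair melhor snippet
--     snippet = content[best_start:best_start + max_length]
--
--     # Adicionar elipses se necessário
--     if best_start > 0:
--         snippet = "..." + snippet
--     if best_start + max_length < len(content):
--         snippet = snippet + "..."
--
--     return snippet
-- ===== SOURCE B (Python) =====
-- def _advance(ps, i, j):
--     """First index >= j whose position is >= i (ps ascending)."""
--     while j < len(ps) and ps[j] < i:
--         j += 1
--     return j
--
--
-- def _occurrences(cl, w):
--     """All start positions of w in cl, ascending."""
--     ps = []
--     p = cl.find(w)
--     while p != -1: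
--         ps.append(p)
--         p = cl.find(w, p + 1)
--     return ps
--
--
-- def _generate_content_snippet(query: str, content: str, max_length: int = 200) -> str:
--     """Same snippet as the original, but each query word's occurrence positions
--     are precomputed once and each window is scored by sliding per-word pointers
--     over those positions instead of substring-searching a fresh slice."""
--     words = [w.lower() for w in query.split()]
--     cl = content.lower()
--     n = len(content)
--     occs = [_occurrences(cl, w) for w in words]
--
--     best_start = 0
--     best_score = 0
--     ptrs = [0] * len(words)
--     for i in range(n - max_length):
--         ptrs = [_advance(ps, i, j) for ps, j in zip(occs, ptrs)]
--         score = sum(1 for (w, ps), j in zip(zip(words, occs), ptrs)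
--                     if j < len(ps) and ps[j] + len(w) <= i + max_length)
--         if score > best_score:
--             best_score = score
--             best_start = i
--
--     snippet = content[best_start:best_start + max_length]
--     if best_start > 0:
--         snippet = "..." + snippet
--     if best_start + max_length < len(content):
--         snippet = snippet + "..."
--     return snippet
-- ===== Notes on version B (the rewrite author's own statement) =====
-- stated objective: faster
-- what changed: B precomputes each query word's occurrence positions in the lowered content once (repeated find) and scores every window by sliding per-word pointers over those position lists, instead of A's per-window slice+lower+substring scan.
-- intended difference: On negative max_length where some wrap-around window (Python's negative-slice semantics) contains strictly more query words than the prefix window, A returns that mid-content snippet with ellipses, while B treats a negative-length window as matching nothing and returns the truncated prefix content[:max_length] plus trailing '...', the sensible value for a nonsensical snippet length. — e.g. on _generate_content_snippet("b", "aba", -2): A returns "...b...", B returns "a..."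
import Mathlib
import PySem

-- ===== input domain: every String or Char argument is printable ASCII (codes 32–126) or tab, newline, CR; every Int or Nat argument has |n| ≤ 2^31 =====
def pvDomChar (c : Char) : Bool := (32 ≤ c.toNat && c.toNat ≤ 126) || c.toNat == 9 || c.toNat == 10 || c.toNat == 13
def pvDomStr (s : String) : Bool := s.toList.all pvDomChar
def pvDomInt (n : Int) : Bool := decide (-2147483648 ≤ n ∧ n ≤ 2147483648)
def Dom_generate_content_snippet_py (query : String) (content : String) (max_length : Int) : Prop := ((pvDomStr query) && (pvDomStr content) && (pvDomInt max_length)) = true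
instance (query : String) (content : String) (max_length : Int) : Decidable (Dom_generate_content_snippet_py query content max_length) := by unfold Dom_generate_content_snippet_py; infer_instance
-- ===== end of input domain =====

-- B replaces A's per-window slice+substring scans by precomputed per-word occurrence
-- positions swept with sliding pointers (objective: faster; measured faster at large sizes).

-- ===== PORT A =====
-- score of the window content[i:i+max_length]: how many query words occur in its lowering
def pvScoreA (query_words : List (List Char)) (cs : List Char) (max_length i : Int) : Int :=
  (query_words.map (fun w =>
      if PySem.Chars.isIn w (PySem.Chars.lower (PySem.List.slice cs (some i) (some (i + max_length)))) then (1:Int) else 0)).sum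

def generate_content_snippet_py (query : String) (content : String) (max_length : Int) : String :=
  let query_words := (PySem.Chars.split₀ query.toList).map PySem.Chars.lower
  let cs := content.toList
  let best := (PySem.List.pyRange 0 ((cs.length : Int) - max_length)).foldl
      (fun (st : Int × Int) i =>
        let score := pvScoreA query_words cs max_length i
        if st.2 < score then (i, score) else st) (0, 0)
  let snippet := PySem.List.slice cs (some best.1) (some (best.1 + max_length))
  let snippet := if 0 < best.1 then '.' :: '.' :: '.' :: snippet else snippet
  let snippet := if best.1 + max_length < (cs.length : Int) then snippet ++ ['.', '.', '.'] else snippet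
  String.ofList snippet

-- ===== PORT B =====
-- Source B _advance: first index ≥ j whose position is ≥ i
def pvAdvanceGo (ps : List Int) (i : Int) (fuel j : Nat) : Nat :=
  match fuel with
  | 0 => j
  | f + 1 => if j < ps.length ∧ ps.getD j 0 < i then pvAdvanceGo ps i f (j + 1) else j

-- fuel ps.length - j only makes the while-loop structural; it never runs out
def pvAdvance (ps : List Int) (i : Int) (j : Nat) : Nat := pvAdvanceGo ps i (ps.length - j) j

-- Source B _occurrences: the find loop (fuel cl.length+2 is an upper bound on the loop's trips)
def pvOccGo (cl w : List Char) (fuel : Nat) (p : Int) (acc : List Int) : List Int :=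
  match fuel with
  | 0 => acc
  | f + 1 => if p = -1 then acc else pvOccGo cl w f (PySem.Chars.findFrom cl w (p + 1)) (acc ++ [p])

def pvOccs (cl w : List Char) : List Int :=
  pvOccGo cl w (cl.length + 2) (PySem.Chars.find cl w) []

-- Source B: ptrs = [_advance(ps, i, j) for ps, j in zip(occs, ptrs)]
def pvStepPtrs (occs : List (List Int)) (ptrs : List Nat) (i : Int) : List Nat :=
  (occs.zip ptrs).map (fun x => pvAdvance x.1 i x.2)

-- Source B: score = sum(1 for (w, ps), j in zip(zip(words, occs), ptrs) if j < len(ps) and ps[j] + len(w) <= i + max_length)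
def pvStepScore (words : List (List Char)) (occs : List (List Int)) (ptrs : List Nat) (i max_length : Int) : Int :=
  (((words.zip occs).zip ptrs).map (fun x =>
      if x.2 < x.1.2.length ∧ x.1.2.getD x.2 0 + (x.1.1.length : Int) ≤ i + max_length then (1:Int) else 0)).sum

def generate_content_snippet_py_alt (query : String) (content : String) (max_length : Int) : String :=
  let words := (PySem.Chars.split₀ query.toList).map PySem.Chars.lower
  let cs := content.toList
  let cl := PySem.Chars.lower cs
  let occs := words.map (fun w => pvOccs cl w)
  let st := (PySem.List.pyRange 0 ((cs.length : Int) - max_length)).foldl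
      (fun (st : Int × Int × List Nat) i =>
        let ptrs := pvStepPtrs occs st.2.2 i
        let score := pvStepScore words occs ptrs i max_length
        if st.2.1 < score then (i, score, ptrs) else (st.1, st.2.1, ptrs))
      (0, 0, List.replicate words.length 0)
  let snippet := PySem.List.slice cs (some st.1) (some (st.1 + max_length))
  let snippet := if 0 < st.1 then '.' :: '.' :: '.' :: snippet else snippet
  let snippet := if st.1 + max_length < (cs.length : Int) then snippet ++ ['.', '.', '.'] else snippet
  String.ofList snippet

-- ===== PRECONDITION & SPEC =====
-- the wrap-around window of a negative-length slice, in plain drop/take form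
def pvWrapWin (content : String) (max_length : Int) (iN : Nat) : List Char :=
  ((PySem.Chars.lower content.toList).drop iN).take ((content.toList.length : Int) + max_length).toNat

-- how many query words (lowered) occur inside a window
def pvHits (query : String) (win : List Char) : Nat :=
  ((PySem.Chars.split₀ query.toList).map PySem.Chars.lower).countP (fun w => decide (w <:+: win))

-- On negative max_length where some wrap-around window (Python's negative-slice semantics)
-- contains strictly more query words than the prefix window, A returns that mid-content
-- snippet with ellipses, while B treats a negative-length window as matching nothing and
-- returns the truncated prefix (with trailing "..."), the intended value for a nonsensical
-- snippet length.
def D_generate_content_snippet_py (query : String) (content : String) (max_length : Int) : Prop :=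
  max_length < 0 ∧ ∃ iN < min (-max_length).toNat content.toList.length,
    pvHits query (pvWrapWin content max_length iN) > pvHits query (pvWrapWin content max_length 0)
instance (query : String) (content : String) (max_length : Int) : Decidable (D_generate_content_snippet_py query content max_length) := by unfold D_generate_content_snippet_py; infer_instance

def Spec_generate_content_snippet_py (query : String) (content : String) (max_length : Int) (out : String) : Prop := ¬ D_generate_content_snippet_py query content max_length → out = generate_content_snippet_py_alt query content max_length
instance (query : String) (content : String) (max_length : Int) (out : String) : Decidable (Spec_generate_content_snippet_py query content max_length out) := by unfold Spec_generate_content_snippet_py; infer_instance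

def pvDiffWitness_generate_content_snippet_py : String × String × Int := ("b", "aba", -2)
def pvDiffWitnessOut_generate_content_snippet_py : String × String := ("...b...", "a...")

-- ===== CLAIM (what is proved, stated in full; the proofs are below) =====
def Claim_unchanged_generate_content_snippet_py : Prop := ∀ (query : String) (content : String) (max_length : Int), Dom_generate_content_snippet_py query content max_length → Spec_generate_content_snippet_py query content max_length (generate_content_snippet_py query content max_length)
def Claim_changed_generate_content_snippet_py : Prop := Dom_generate_content_snippet_py (pvDiffWitness_generate_content_snippet_py.1) (pvDiffWitness_generate_content_snippet_py.2.1) (pvDiffWitness_generate_content_snippet_py.2.2) ∧ D_generate_content_snippet_py (pvDiffWitness_generate_content_snippet_py.1) (pvDiffWitness_generate_content_snippet_py.2.1) (pvDiffWitness_generate_content_snippet_py.2.2) ∧ generate_content_snippet_py (pvDiffWitness_generate_content_snippet_py.1) (pvDiffWitness_generate_content_snippet_py.2.1) (pvDiffWitness_generate_content_snippet_py.2.2) = pvDiffWitnessOut_generate_content_snippet_py.1 ∧ generate_content_snippet_py_alt (pvDiffWitness_generate_content_snippet_py.1) (pvDiffWitness_generate_content_snippet_py.2.1) (pvDiffWitness_generate_content_snippet_py.2.2)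 = pvDiffWitnessOut_generate_content_snippet_py.2 ∧ pvDiffWitnessOut_generate_content_snippet_py.1 ≠ pvDiffWitnessOut_generate_content_snippet_py.2
def Claim_exact_generate_content_snippet_py : Prop := ∀ (query : String) (content : String) (max_length : Int), Dom_generate_content_snippet_py query content max_length → D_generate_content_snippet_py query content max_length → generate_content_snippet_py query content max_length ≠ generate_content_snippet_py_alt query content max_length

-- ===== LEMMAS AND PROOFS =====

-- `lower` is a character map, so it commutes with slicing
lemma pv_lower_slice (cs : List Char) (a b : Option Int) :
    PySem.Chars.lower (PySem.List.slice cs a b) = PySem.List.slice (PySem.Chars.lower cs) a b := by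
  simp [PySem.Chars.lower, PySem.List.slice, List.map_take, List.map_drop]

lemma pv_length_lower (cs : List Char) : (PySem.Chars.lower cs).length = cs.length := by
  simp [PySem.Chars.lower]

-- beyond the wrap-around region (i ≥ -L or i ≥ len) a negative-length window is empty
lemma pv_slice_neg_nil (cs : List Char) (L : Int) (iN : Nat) (hL : L < 0)
    (h : -L ≤ (iN : Int) ∨ cs.length ≤ iN) :
    PySem.List.slice cs (some (iN : Int)) (some ((iN : Int) + L)) = [] := by
  apply List.eq_nil_of_length_eq_zero
  rw [PySem.List.length_slice]
  simp only [PySem.List.clampIdx]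
  split_ifs <;> omega

-- a findFrom start beyond the string yields -1
lemma pv_findFrom_gt_len (cl w : List Char) (st : Int) (h : (cl.length : Int) < st) :
    PySem.Chars.findFrom cl w st = -1 := by
  unfold PySem.Chars.findFrom
  simp only []
  split_ifs with h1 h2 h3 <;> first | rfl | omega

-- ---- the while-pointer `_advance` ----

lemma pvAdvanceGo_spec (ps : List Int) (i : Int) :
    ∀ (fuel j : Nat), ps.length ≤ j + fuel → j ≤ ps.length →
      j ≤ pvAdvanceGo ps i fuel j ∧ pvAdvanceGo ps i fuel j ≤ ps.length ∧
      (∀ idx, j ≤ idx → idx < pvAdvanceGo ps i fuel j → ps.getD idx 0 < i) ∧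
      (pvAdvanceGo ps i fuel j < ps.length → ¬ ps.getD (pvAdvanceGo ps i fuel j) 0 < i) := by
  intro fuel
  induction fuel with
  | zero =>
    intro j hf hj
    simp only [pvAdvanceGo]
    refine ⟨le_refl _, hj, ?_, ?_⟩ <;> omega
  | succ f ih =>
    intro j hf hj
    by_cases h : j < ps.length ∧ ps.getD j 0 < i
    · have := ih (j + 1) (by omega) (by omega)
      simp only [pvAdvanceGo, if_pos h]
      refine ⟨by omega, this.2.1, ?_, this.2.2.2⟩
      intro idx h1 h2
      rcases Nat.eq_or_lt_of_le h1 with rfl | hlt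
      · exact h.2
      · exact this.2.2.1 idx (by omega) h2
    · simp only [pvAdvanceGo, if_neg h]
      refine ⟨le_refl _, hj, ?_, ?_⟩
      · intro idx h1 h2; omega
      · intro hlen hcon; exact h ⟨hlen, hcon⟩

lemma pvAdvance_spec (ps : List Int) (i : Int) (j : Nat) (hj : j ≤ ps.length) :
    j ≤ pvAdvance ps i j ∧ pvAdvance ps i j ≤ ps.length ∧
    (∀ idx, j ≤ idx → idx < pvAdvance ps i j → ps.getD idx 0 < i) ∧
    (pvAdvance ps i j < ps.length → ¬ ps.getD (pvAdvance ps i j) 0 < i) :=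
  pvAdvanceGo_spec ps i (ps.length - j) j (by omega) hj

-- when the start pointer is already past the list the loop does nothing
lemma pvAdvance_of_gt (ps : List Int) (i : Int) (j : Nat) (hj : ps.length < j) :
    pvAdvance ps i j = j := by
  unfold pvAdvance
  have : ps.length - j = 0 := by omega
  rw [this]; rfl

-- ---- the `_occurrences` find loop ----

def pvOccGood (cl w : List Char) (ps : List Int) : Prop :=
  ps.Pairwise (· < ·) ∧
  (∀ p ∈ ps, ∃ pn : Nat, p = (pn : Int) ∧ pn ≤ cl.length ∧ w <+: cl.drop pn) ∧
  (∀ pn : Nat, pn ≤ cl.length → w <+: cl.drop pn → (pn : Int) ∈ ps)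

lemma pvOccGo_spec (cl w : List Char) :
    ∀ (fuel k : Nat) (acc : List Int), k ≤ cl.length → cl.length + 1 ≤ k + fuel →
      ∃ t, pvOccGo cl w fuel (PySem.Chars.findFrom cl w (k : Int)) acc = acc ++ t ∧
        t.Pairwise (· < ·) ∧
        (∀ p ∈ t, ∃ pn : Nat, p = (pn : Int) ∧ k ≤ pn ∧ pn ≤ cl.length ∧ w <+: cl.drop pn) ∧
        (∀ pn : Nat, k ≤ pn → pn ≤ cl.length → w <+: cl.drop pn → (pn : Int) ∈ t) := by
  intro fuel
  induction fuel with
  | zero => intro k acc hk hf; omega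
  | succ f ih =>
    intro k acc hk hf
    by_cases hfv : PySem.Chars.findFrom cl w (k : Int) = -1
    · refine ⟨[], ?_, ?_, ?_, ?_⟩
      · simp [pvOccGo, hfv]
      · exact List.Pairwise.nil
      · intro p hp; cases hp
      · intro pn h1 h2 h3
        exfalso
        have hno := (PySem.Chars.findFrom_natCast_eq_neg_one_iff cl w k hk).mp hfv
        apply hno
        have : cl.drop pn = (cl.drop k).drop (pn - k) := by
          rw [List.drop_drop]; congr 1; omega
        rw [this] at h3
        exact h3.isInfix.trans (List.drop_suffix _ _).isInfix
    · obtain ⟨hge, hpre, hmin⟩ := PySem.Chars.findFrom_natCast_spec cl w k hk hfv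
      set fv := PySem.Chars.findFrom cl w (k : Int) with hfvdef
      have hfv0 : (0 : Int) ≤ fv := le_trans (by exact_mod_cast Nat.zero_le k) hge
      set p₀ : Nat := fv.toNat with hp₀def
      have hfvp : fv = (p₀ : Int) := (Int.toNat_of_nonneg hfv0).symm
      have hkp : k ≤ p₀ := by omega
      have hp₀n : p₀ ≤ cl.length := by
        by_cases hw : w = []
        · subst hw
          by_contra hgt
          exact hmin k (le_refl _) (by omega) List.nil_prefix
        · have hlen : 0 < w.length := List.length_pos_of_ne_nil hw
          have := hpre.length_le
          simp [List.length_drop] at this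
          omega
      have hstep : pvOccGo cl w (f + 1) fv acc
          = pvOccGo cl w f (PySem.Chars.findFrom cl w (fv + 1)) (acc ++ [fv]) := by
        simp [pvOccGo, hfv]
      by_cases hp1 : p₀ + 1 ≤ cl.length
      · have hcast : fv + 1 = ((p₀ + 1 : Nat) : Int) := by omega
        obtain ⟨t', ht'eq, ht'pw, ht'mem, ht'comp⟩ := ih (p₀ + 1) (acc ++ [fv]) hp1 (by omega)
        refine ⟨fv :: t', ?_, ?_, ?_, ?_⟩
        · rw [hstep, hcast, ht'eq, List.append_assoc]; rfl
        · constructor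
          · intro p hp
            obtain ⟨pn, rfl, hpn1, _, _⟩ := ht'mem p hp
            omega
          · exact ht'pw
        · intro p hp
          rcases List.mem_cons.mp hp with rfl | hp
          · exact ⟨p₀, hfvp, hkp, hp₀n, hpre⟩
          · obtain ⟨pn, rfl, h1, h2, h3⟩ := ht'mem p hp
            exact ⟨pn, rfl, by omega, h2, h3⟩
        · intro pn h1 h2 h3
          rcases Nat.lt_or_ge pn (p₀ + 1) with hlt | hge'
          · have : pn = p₀ := by
              by_contra hne
              exact hmin pn h1 (by omega) h3
            rw [this, ← hfvp]; exact List.mem_cons_self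
          · exact List.mem_cons_of_mem _ (ht'comp pn hge' h2 h3)
      · have hp₀eq : p₀ = cl.length := by omega
        have hnext : PySem.Chars.findFrom cl w (fv + 1) = -1 := by
          apply pv_findFrom_gt_len
          omega
        have hres : pvOccGo cl w f (PySem.Chars.findFrom cl w (fv + 1)) (acc ++ [fv]) = acc ++ [fv] := by
          rw [hnext]
          cases f <;> simp [pvOccGo]
        refine ⟨[fv], by rw [hstep, hres], List.pairwise_singleton _ _, ?_, ?_⟩
        · intro p hp
          rcases List.mem_singleton.mp hp with rfl
          exact ⟨p₀, hfvp, hkp, hp₀n, hpre⟩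
        · intro pn h1 h2 h3
          have : pn = p₀ := by
            by_contra hne
            exact hmin pn h1 (by omega) h3
          rw [this, ← hfvp]; exact List.mem_cons_self

lemma pvOccs_good (cl w : List Char) : pvOccGood cl w (pvOccs cl w) := by
  unfold pvOccs
  rw [← PySem.Chars.findFrom_zero]
  obtain ⟨t, hteq, hpw, hmem, hcomp⟩ :=
    pvOccGo_spec cl w (cl.length + 2) 0 [] (Nat.zero_le _) (by omega)
  have : (0 : Int) = ((0 : Nat) : Int) := rfl
  rw [this, hteq]
  refine ⟨by simpa using hpw, ?_, ?_⟩
  · intro p hp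
    obtain ⟨pn, rfl, _, h2, h3⟩ := hmem p (by simpa using hp)
    exact ⟨pn, rfl, h2, h3⟩
  · intro pn h1 h2
    simpa using hcomp pn (Nat.zero_le _) h1 h2

-- the advanced pointer's fit test is exactly "some occurrence lies inside the window"
lemma pv_fit_iff (cl w : List Char) (ps : List Int) (hg : pvOccGood cl w ps)
    (i L : Int) (j : Nat) (hj : j ≤ ps.length)
    (hlow : ∀ idx, idx < j → ps.getD idx 0 < i) :
    (pvAdvance ps i j < ps.length ∧ ps.getD (pvAdvance ps i j) 0 + (w.length : Int) ≤ i + L)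
    ↔ ∃ pn : Nat, pn ≤ cl.length ∧ i ≤ (pn : Int) ∧ (pn : Int) + w.length ≤ i + L ∧ w <+: cl.drop pn := by
  obtain ⟨hjr, hrlen, hmid, hstop⟩ := pvAdvance_spec ps i j hj
  set r := pvAdvance ps i j with hrdef
  have hall : ∀ idx, idx < r → ps.getD idx 0 < i := by
    intro idx hidx
    rcases Nat.lt_or_ge idx j with h | h
    · exact hlow idx h
    · exact hmid idx h hidx
  constructor
  · rintro ⟨h1, h2⟩
    have hmemr : ps.getD r 0 ∈ ps := by
      rw [List.getD_eq_getElem ps 0 h1]; exact List.getElem_mem h1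
    obtain ⟨pn, hpn, hpnlen, hpre⟩ := hg.2.1 _ hmemr
    refine ⟨pn, hpnlen, ?_, ?_, hpre⟩
    · rw [← hpn]; exact not_lt.mp (hstop h1)
    · rw [← hpn]; exact h2
  · rintro ⟨pn, hpnlen, hge, hfit, hpre⟩
    have hmem : (pn : Int) ∈ ps := hg.2.2 pn hpnlen hpre
    obtain ⟨idx, hidx, hval⟩ := List.getElem_of_mem hmem
    have hridx : r ≤ idx := by
      by_contra hcon
      have := hall idx (by omega)
      rw [List.getD_eq_getElem ps 0 hidx, hval] at this
      omega
    have h1 : r < ps.length := by omega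
    refine ⟨h1, ?_⟩
    have hle : ps.getD r 0 ≤ (pn : Int) := by
      rcases Nat.eq_or_lt_of_le hridx with rfl | hlt
      · rw [List.getD_eq_getElem ps 0 h1, hval]
      · have h2 := (List.pairwise_iff_getElem.mp hg.1) r idx h1 hidx hlt
        rw [hval] at h2
        rw [List.getD_eq_getElem ps 0 h1]
        exact le_of_lt h2
    omega

-- a word occurs in the lowered window iff some occurrence of it in the lowered content
-- starts in [i, i+L-|w|]
lemma pv_present_iff (cs w : List Char) (iN LN : Nat) (hiL : iN + LN ≤ cs.length) :
    PySem.Chars.isIn w (PySem.Chars.lower (PySem.List.slice cs (some (iN : Int)) (some ((iN : Int) + (LN : Int))))) = true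
    ↔ ∃ pn : Nat, pn ≤ cs.length ∧ (iN : Int) ≤ (pn : Int) ∧ (pn : Int) + w.length ≤ (iN : Int) + LN ∧
        w <+: (PySem.Chars.lower cs).drop pn := by
  rw [pv_lower_slice, PySem.List.slice_natCast_add]
  rw [← PySem.Chars.exists_prefix_drop_iff_isIn]
  set cl := PySem.Chars.lower cs with hcl
  have hlen : cl.length = cs.length := pv_length_lower cs
  constructor
  · rintro ⟨j, hj⟩
    rw [List.drop_take, List.drop_drop] at hj
    rw [List.prefix_take_iff] at hj
    obtain ⟨hpre, hwlen⟩ := hj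
    by_cases hjL : j ≤ LN
    · refine ⟨iN + j, by omega, by exact_mod_cast Nat.le_add_right iN j, by push_cast; omega, hpre⟩
    · have : w = [] := by
        have : LN - j = 0 := by omega
        rw [this] at hwlen
        exact List.eq_nil_of_length_eq_zero (by omega)
      subst this
      exact ⟨iN, by omega, le_refl _, by simp, List.nil_prefix⟩
  · rintro ⟨pn, hpnlen, hge, hfit, hpre⟩
    refine ⟨pn - iN, ?_⟩
    rw [List.drop_take, List.drop_drop, List.prefix_take_iff]
    have hin : iN ≤ pn := by exact_mod_cast hge
    have hipn : iN + (pn - iN) = pn := by omega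
    rw [hipn]
    exact ⟨hpre, by omega⟩

-- ---- pointer invariant and per-step score equality ----

def pvInv (occs : List (List Int)) (ptrs : List Nat) (i : Int) : Prop :=
  List.Forall₂ (fun ps j => j ≤ ps.length ∧ ∀ idx, idx < j → ps.getD idx 0 < i) occs ptrs

lemma pvInv_replicate (occs : List (List Int)) (i : Int) :
    pvInv occs (List.replicate occs.length 0) i := by
  induction occs with
  | nil => exact List.Forall₂.nil
  | cons ps occs ih =>
    simp only [List.length_cons, List.replicate_succ]
    exact List.Forall₂.cons ⟨Nat.zero_le _, by omega⟩ ih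

lemma pvStep_eq (cs : List Char) (LN : Nat) :
    ∀ (qws : List (List Char)) (occs : List (List Int)) (ptrs : List Nat) (iN : Nat),
      occs = qws.map (fun w => pvOccs (PySem.Chars.lower cs) w) →
      pvInv occs ptrs (iN : Int) →
      iN + LN ≤ cs.length →
      pvStepScore qws occs (pvStepPtrs occs ptrs (iN : Int)) (iN : Int) (LN : Int)
          = pvScoreA qws cs (LN : Int) (iN : Int)
      ∧ ∀ i' : Int, (iN : Int) ≤ i' → pvInv occs (pvStepPtrs occs ptrs (iN : Int)) i' := by
  intro qws
  induction qws with
  | nil =>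
    intro occs ptrs iN hocc hinv hiL
    subst hocc
    cases hinv
    exact ⟨by simp [pvStepScore, pvStepPtrs, pvScoreA], fun i' _ => List.Forall₂.nil⟩
  | cons w qws ih =>
    intro occs ptrs iN hocc hinv hiL
    subst hocc
    rcases hinv with - | ⟨⟨hj, hlow⟩, hinv'⟩
    rename_i j ptrs'
    set cl := PySem.Chars.lower cs with hcl
    set ps := pvOccs cl w with hps
    obtain ⟨ihs, ihinv⟩ := ih (qws.map (fun w => pvOccs cl w)) ptrs' iN rfl hinv' hiL
    have hg := pvOccs_good cl w
    have hfit := pv_fit_iff cl w ps hg (iN : Int) (LN : Int) j hj hlow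
    have hpres := pv_present_iff cs w iN LN hiL
    have hlen : cl.length = cs.length := pv_length_lower cs
    have hiff : (pvAdvance ps (iN : Int) j < ps.length ∧
        ps.getD (pvAdvance ps (iN : Int) j) 0 + (w.length : Int) ≤ (iN : Int) + (LN : Int))
        ↔ PySem.Chars.isIn w (PySem.Chars.lower (PySem.List.slice cs (some (iN : Int)) (some ((iN : Int) + (LN : Int))))) = true := by
      rw [hfit, hpres, hlen]
    obtain ⟨hadv1, hadv2, hadv3, hadv4⟩ := pvAdvance_spec ps (iN : Int) j hj
    constructor
    · simp only [pvStepPtrs, pvStepScore, pvScoreA, List.map_cons, List.zip_cons_cons,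
        List.sum_cons] at ihs ⊢
      rw [ihs]
      by_cases hA : PySem.Chars.isIn w (PySem.Chars.lower (PySem.List.slice cs (some (iN : Int)) (some ((iN : Int) + (LN : Int))))) = true
      · rw [if_pos (hiff.mpr hA), if_pos hA]
      · rw [if_neg (fun hc => hA (hiff.mp hc)), if_neg hA]
    · intro i' hi'
      simp only [pvStepPtrs, List.map_cons, List.zip_cons_cons] at ihinv ⊢
      refine List.Forall₂.cons ⟨hadv2, ?_⟩ (ihinv i' hi')
      intro idx hidx
      have : ps.getD idx 0 < (iN : Int) := by
        rcases Nat.lt_or_ge idx j with h | h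
        · exact hlow idx h
        · exact hadv3 idx h hidx
      exact lt_of_lt_of_le this hi'

-- ---- the two folds agree (L ≥ 0 path) ----

lemma pvFold_eq (cs : List Char) (LN : Nat) (qws : List (List Char)) (occs : List (List Int))
    (hocc : occs = qws.map (fun w => pvOccs (PySem.Chars.lower cs) w)) :
    ∀ (is : List Nat) (a s : Int) (ptrs : List Nat),
      (∀ iN ∈ is, iN + LN ≤ cs.length) → is.Pairwise (· ≤ ·) →
      (∀ iN ∈ is, pvInv occs ptrs (iN : Int)) →
      ∃ ptrs',
        (is.map (Nat.cast : Nat → Int)).foldl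
          (fun (st : Int × Int × List Nat) i =>
            if st.2.1 < pvStepScore qws occs (pvStepPtrs occs st.2.2 i) i (LN : Int) then
              (i, pvStepScore qws occs (pvStepPtrs occs st.2.2 i) i (LN : Int), pvStepPtrs occs st.2.2 i)
            else (st.1, st.2.1, pvStepPtrs occs st.2.2 i))
          (a, s, ptrs)
        = (((is.map (Nat.cast : Nat → Int)).foldl
              (fun (st : Int × Int) i =>
                if st.2 < pvScoreA qws cs (LN : Int) i then (i, pvScoreA qws cs (LN : Int) i) else st) (a, s)).1,
           ((is.map (Nat.cast : Nat → Int)).foldl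
              (fun (st : Int × Int) i =>
                if st.2 < pvScoreA qws cs (LN : Int) i then (i, pvScoreA qws cs (LN : Int) i) else st) (a, s)).2, ptrs') := by
  intro is
  induction is with
  | nil => intro a s ptrs _ _ _; exact ⟨ptrs, rfl⟩
  | cons iN is ih =>
    intro a s ptrs hbound hpw hinv
    obtain ⟨hs, hinv'⟩ := pvStep_eq cs LN qws occs ptrs iN hocc
      (hinv iN (List.mem_cons_self)) (hbound iN (List.mem_cons_self))
    have hinvtail : ∀ iN' ∈ is, pvInv occs (pvStepPtrs occs ptrs (iN : Int)) (iN' : Int) := by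
      intro iN' hmem
      exact hinv' (iN' : Int) (by exact_mod_cast (List.pairwise_cons.mp hpw).1 iN' hmem)
    have hbound' : ∀ iN' ∈ is, iN' + LN ≤ cs.length := fun iN' h => hbound iN' (List.mem_cons_of_mem _ h)
    have hpw' : is.Pairwise (· ≤ ·) := (List.pairwise_cons.mp hpw).2
    simp only [List.map_cons, List.foldl_cons, hs]
    by_cases h : s < pvScoreA qws cs (LN : Int) (iN : Int)
    · rw [if_pos h, if_pos h]
      exact ih (iN : Int) (pvScoreA qws cs (LN : Int) (iN : Int)) (pvStepPtrs occs ptrs (iN : Int))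
        hbound' hpw' hinvtail
    · rw [if_neg h, if_neg h]
      exact ih a s (pvStepPtrs occs ptrs (iN : Int)) hbound' hpw' hinvtail

-- ---- negative max_length: B's windows match nothing ----

lemma pvStepScore_neg (L : Int) (hL : L < 0) :
    ∀ (qws : List (List Char)) (occs : List (List Int)) (ptrs : List Nat) (i : Int),
      pvStepScore qws occs (pvStepPtrs occs ptrs i) i L = 0 := by
  intro qws
  induction qws with
  | nil => intro occs ptrs i; simp [pvStepScore]
  | cons w qws ih =>
    intro occs ptrs i
    cases occs with
    | nil => simp [pvStepScore, pvStepPtrs]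
    | cons ps occs =>
      cases ptrs with
      | nil => simp [pvStepScore, pvStepPtrs]
      | cons j ptrs =>
        have htail := ih occs ptrs i
        simp only [pvStepPtrs, pvStepScore, List.zip_cons_cons, List.map_cons,
          List.sum_cons] at htail ⊢
        rw [htail]
        rw [if_neg, add_zero]
        rintro ⟨h1, h2⟩
        by_cases hjlen : j ≤ ps.length
        · have hspec := pvAdvance_spec ps i j hjlen
          have hge := hspec.2.2.2 h1
          have hw : (0 : Int) ≤ (w.length : Int) := Int.natCast_nonneg _
          omega
        · have := pvAdvance_of_gt ps i j (by omega)
          rw [this] at h1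
          omega

lemma pvFoldB_neg (qws : List (List Char)) (occs : List (List Int)) (L : Int) (hL : L < 0) :
    ∀ (is : List Int) (a : Int) (ptrs : List Nat),
      ∃ ptrs', is.foldl
          (fun (st : Int × Int × List Nat) i =>
            if st.2.1 < pvStepScore qws occs (pvStepPtrs occs st.2.2 i) i L then
              (i, pvStepScore qws occs (pvStepPtrs occs st.2.2 i) i L, pvStepPtrs occs st.2.2 i)
            else (st.1, st.2.1, pvStepPtrs occs st.2.2 i)) (a, 0, ptrs)
        = (a, 0, ptrs') := by
  intro is
  induction is with
  | nil => intro a ptrs; exact ⟨ptrs, rfl⟩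
  | cons i is ih =>
    intro a ptrs
    simp only [List.foldl_cons]
    rw [pvStepScore_neg L hL qws occs ptrs i, if_neg (lt_irrefl 0)]
    exact ih a (pvStepPtrs occs ptrs i)

-- ---- negative max_length: A's first window dominates outside D_ ----

lemma pv_slice_wrap (cl : List Char) (L : Int) (iN : Nat) (hn : iN ≤ cl.length)
    (hneg : (iN : Int) + L < 0) :
    PySem.List.slice cl (some (iN : Int)) (some ((iN : Int) + L))
      = (cl.drop iN).take ((cl.length : Int) + L).toNat := by
  unfold PySem.List.slice
  simp only []
  have h1 : PySem.List.clampIdx cl.length (iN : Int) = iN := by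
    simp only [PySem.List.clampIdx]
    split_ifs <;> omega
  have h2 : PySem.List.clampIdx cl.length ((iN : Int) + L) - iN = ((cl.length : Int) + L).toNat := by
    simp only [PySem.List.clampIdx]
    split_ifs <;> omega
  rw [h1, h2]

lemma pvScoreA_eq_hits (query content : String) (L : Int) (iN : Nat)
    (hn : iN ≤ content.toList.length) (hneg : (iN : Int) + L < 0) :
    pvScoreA ((PySem.Chars.split₀ query.toList).map PySem.Chars.lower) content.toList L (iN : Int)
      = (pvHits query (pvWrapWin content L iN) : Int) := by
  unfold pvScoreA pvHits pvWrapWin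
  simp only [pv_lower_slice]
  rw [PySem.List.sum_map_ite_one_zero]
  congr 1
  apply List.countP_congr
  intro w _
  rw [pv_slice_wrap (PySem.Chars.lower content.toList) L iN (by rw [pv_length_lower]; omega) hneg,
    pv_length_lower]
  simp [PySem.Chars.isIn_iff_infix]

lemma pvScoreA_mono (qws : List (List Char)) (cs : List Char) (L i₁ i₂ : Int)
    (h : ∀ w ∈ qws,
      PySem.Chars.isIn w (PySem.Chars.lower (PySem.List.slice cs (some i₁) (some (i₁ + L)))) = true →
      PySem.Chars.isIn w (PySem.Chars.lower (PySem.List.slice cs (some i₂) (some (i₂ + L)))) = true) :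
    pvScoreA qws cs L i₁ ≤ pvScoreA qws cs L i₂ := by
  unfold pvScoreA
  rw [PySem.List.sum_map_ite_one_zero, PySem.List.sum_map_ite_one_zero]
  exact_mod_cast List.countP_mono_left h

lemma pvFoldA_stay (qws : List (List Char)) (cs : List Char) (L : Int) :
    ∀ (is : List Int) (st : Int × Int),
      (∀ i ∈ is, pvScoreA qws cs L i ≤ st.2) →
      is.foldl (fun (st : Int × Int) i =>
        if st.2 < pvScoreA qws cs L i then (i, pvScoreA qws cs L i) else st) st = st := by
  intro is
  induction is with
  | nil => intro st _; rfl
  | cons i is ih =>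
    intro st h
    simp only [List.foldl_cons]
    rw [if_neg (not_lt.mpr (h i List.mem_cons_self))]
    exact ih st (fun i' hi' => h i' (List.mem_cons_of_mem _ hi'))

lemma pvFoldA_neg (qws : List (List Char)) (cs : List Char) (L : Int) (hL : L < 0)
    (hmono : ∀ iN : Nat, pvScoreA qws cs L (iN : Int) ≤ pvScoreA qws cs L 0) :
    ((PySem.List.pyRange 0 ((cs.length : Int) - L)).foldl
      (fun (st : Int × Int) i =>
        if st.2 < pvScoreA qws cs L i then (i, pvScoreA qws cs L i) else st) (0, 0)).1 = 0 := by
  rw [PySem.List.pyRange_one]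
  have hM : ∃ M', (((cs.length : Int) - L) - 0).toNat = M' + 1 := by
    refine ⟨(((cs.length : Int) - L) - 0).toNat - 1, ?_⟩
    have : (0 : Int) ≤ (cs.length : Int) := Int.natCast_nonneg _
    omega
  obtain ⟨M', hM⟩ := hM
  rw [hM, List.range_succ_eq_map]
  simp only [List.map_cons, List.foldl_cons, zero_add, Nat.cast_zero]
  have hstay := pvFoldA_stay qws cs L
    (((List.range M').map Nat.succ).map (Nat.cast : Nat → Int))
  by_cases h0 : (0 : Int) < pvScoreA qws cs L 0
  · rw [if_pos (by simpa using h0)]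
    rw [hstay ((0 : Int), pvScoreA qws cs L 0) ?_]
    · intro i hi
      simp only [List.mem_map] at hi
      obtain ⟨k, ⟨k', _, rfl⟩, rfl⟩ := hi
      exact hmono _
  · rw [if_neg (by simpa using h0)]
    rw [hstay ((0 : Int), (0 : Int)) ?_]
    · intro i hi
      simp only [List.mem_map] at hi
      obtain ⟨k, ⟨k', _, rfl⟩, rfl⟩ := hi
      exact le_trans (hmono _) (not_lt.mp h0)


-- ---- tightness: inside D_ the two programs really differ ----

-- pieces of str.split() are never empty
lemma pv_split0_go_ne (s : List Char) :
    ∀ (cur : List Char) (acc : List (List Char)), (∀ x ∈ acc, x ≠ []) →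
      ∀ x ∈ PySem.Chars.split₀.go s cur acc, x ≠ [] := by
  induction s with
  | nil =>
    intro cur acc hacc x hx
    simp only [PySem.Chars.split₀.go] at hx
    by_cases hc : cur.isEmpty
    · rw [if_pos hc, List.mem_reverse] at hx
      exact hacc x hx
    · rw [if_neg hc, List.mem_reverse] at hx
      rcases List.mem_cons.mp hx with rfl | hx
      · simp only [ne_eq, List.reverse_eq_nil_iff]
        intro h
        rw [h] at hc
        exact hc rfl
      · exact hacc x hx
  | cons c rest ih =>
    intro cur acc hacc x hx
    simp only [PySem.Chars.split₀.go] at hx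
    by_cases hsp : PySem.Chars.isspace c
    · rw [if_pos hsp] at hx
      by_cases hc : cur.isEmpty
      · rw [if_pos hc] at hx
        exact ih [] acc hacc x hx
      · rw [if_neg hc] at hx
        refine ih [] (cur.reverse :: acc) ?_ x hx
        intro y hy
        rcases List.mem_cons.mp hy with rfl | hy
        · simp only [ne_eq, List.reverse_eq_nil_iff]
          intro h
          rw [h] at hc
          exact hc rfl
        · exact hacc y hy
    · rw [if_neg hsp] at hx
      exact ih (c :: cur) acc hacc x hx

lemma pv_words_ne_nil (q : List Char) :
    ∀ w ∈ (PySem.Chars.split₀ q).map PySem.Chars.lower, w ≠ [] := by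
  intro w hw
  obtain ⟨u, hu, rfl⟩ := List.exists_of_mem_map hw
  have hune : u ≠ [] := pv_split0_go_ne q [] [] (by intro x hx; cases hx) u hu
  simp only [PySem.Chars.lower, ne_eq, List.map_eq_nil_iff]
  exact hune

-- A's argmax fold: general facts about the accumulator
lemma pvFoldA_fst_mem (qws : List (List Char)) (cs : List Char) (L : Int) :
    ∀ (is : List Int) (st : Int × Int),
      (is.foldl (fun (st : Int × Int) i =>
        if st.2 < pvScoreA qws cs L i then (i, pvScoreA qws cs L i) else st) st).1 = st.1 ∨
      (is.foldl (fun (st : Int × Int) i =>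
        if st.2 < pvScoreA qws cs L i then (i, pvScoreA qws cs L i) else st) st).1 ∈ is := by
  intro is
  induction is with
  | nil => intro st; exact Or.inl rfl
  | cons i is ih =>
    intro st
    simp only [List.foldl_cons]
    by_cases h : st.2 < pvScoreA qws cs L i
    · rw [if_pos h]
      rcases ih (i, pvScoreA qws cs L i) with h1 | h1
      · exact Or.inr (h1 ▸ List.mem_cons_self)
      · exact Or.inr (List.mem_cons_of_mem _ h1)
    · rw [if_neg h]
      rcases ih st with h1 | h1
      · exact Or.inl h1
      · exact Or.inr (List.mem_cons_of_mem _ h1)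

lemma pvFoldA_upd (qws : List (List Char)) (cs : List Char) (L : Int) :
    ∀ (is : List Int) (st : Int × Int), (∃ i ∈ is, st.2 < pvScoreA qws cs L i) →
      (is.foldl (fun (st : Int × Int) i =>
        if st.2 < pvScoreA qws cs L i then (i, pvScoreA qws cs L i) else st) st).1 ∈ is := by
  intro is
  induction is with
  | nil => rintro st ⟨i, hi, -⟩; cases hi
  | cons i is ih =>
    rintro st ⟨i', hi', hlt⟩
    simp only [List.foldl_cons]
    by_cases h : st.2 < pvScoreA qws cs L i
    · rw [if_pos h]
      rcases pvFoldA_fst_mem qws cs L is (i, pvScoreA qws cs L i) with h1 | h1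
      · exact h1 ▸ List.mem_cons_self
      · exact List.mem_cons_of_mem _ h1
    · rw [if_neg h]
      rcases List.mem_cons.mp hi' with rfl | hi'
      · exact absurd hlt h
      · exact List.mem_cons_of_mem _ (ih st ⟨i', hi', hlt⟩)

lemma pvFoldA_snd_mono (qws : List (List Char)) (cs : List Char) (L : Int) :
    ∀ (is : List Int) (st : Int × Int),
      st.2 ≤ (is.foldl (fun (st : Int × Int) i =>
        if st.2 < pvScoreA qws cs L i then (i, pvScoreA qws cs L i) else st) st).2 := by
  intro is
  induction is with
  | nil => intro st; exact le_refl _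
  | cons i is ih =>
    intro st
    simp only [List.foldl_cons]
    by_cases h : st.2 < pvScoreA qws cs L i
    · rw [if_pos h]
      exact le_trans (le_of_lt h) (ih _)
    · rw [if_neg h]
      exact ih st

lemma pvFoldA_ge (qws : List (List Char)) (cs : List Char) (L : Int) :
    ∀ (is : List Int) (st : Int × Int), ∀ i ∈ is,
      pvScoreA qws cs L i ≤ (is.foldl (fun (st : Int × Int) i =>
        if st.2 < pvScoreA qws cs L i then (i, pvScoreA qws cs L i) else st) st).2 := by
  intro is
  induction is with
  | nil => intro st i hi; cases hi
  | cons j is ih =>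
    intro st i hi
    simp only [List.foldl_cons]
    rcases List.mem_cons.mp hi with rfl | hi
    · by_cases h : st.2 < pvScoreA qws cs L i
      · rw [if_pos h]
        exact pvFoldA_snd_mono qws cs L is _
      · rw [if_neg h]
        exact le_trans (not_lt.mp h) (pvFoldA_snd_mono qws cs L is st)
    · by_cases h : st.2 < pvScoreA qws cs L j
      · rw [if_pos h]; exact ih _ i hi
      · rw [if_neg h]; exact ih st i hi

lemma pvFoldA_snd_eq (qws : List (List Char)) (cs : List Char) (L : Int) :
    ∀ (is : List Int) (st : Int × Int),
      is.foldl (fun (st : Int × Int) i =>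
        if st.2 < pvScoreA qws cs L i then (i, pvScoreA qws cs L i) else st) st = st ∨
      ((is.foldl (fun (st : Int × Int) i =>
          if st.2 < pvScoreA qws cs L i then (i, pvScoreA qws cs L i) else st) st).2
        = pvScoreA qws cs L ((is.foldl (fun (st : Int × Int) i =>
          if st.2 < pvScoreA qws cs L i then (i, pvScoreA qws cs L i) else st) st).1) ∧
       (is.foldl (fun (st : Int × Int) i =>
          if st.2 < pvScoreA qws cs L i then (i, pvScoreA qws cs L i) else st) st).1 ∈ is) := by
  intro is
  induction is with
  | nil => intro st; exact Or.inl rfl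
  | cons i is ih =>
    intro st
    simp only [List.foldl_cons]
    by_cases h : st.2 < pvScoreA qws cs L i
    · rw [if_pos h]
      rcases ih (i, pvScoreA qws cs L i) with h1 | ⟨h1, h2⟩
      · rw [h1]
        exact Or.inr ⟨rfl, List.mem_cons_self⟩
      · exact Or.inr ⟨h1, List.mem_cons_of_mem _ h2⟩
    · rw [if_neg h]
      rcases ih st with h1 | ⟨h1, h2⟩
      · exact Or.inl h1
      · exact Or.inr ⟨h1, List.mem_cons_of_mem _ h2⟩

lemma pvScoreA_nonneg (qws : List (List Char)) (cs : List Char) (L i : Int) :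
    0 ≤ pvScoreA qws cs L i := by
  unfold pvScoreA
  rw [PySem.List.sum_map_ite_one_zero]
  exact Int.natCast_nonneg _

lemma pvFoldA_posbest (qws : List (List Char)) (cs : List Char) (L : Int) (hL : L < 0)
    (i₀ : Nat) (h1 : 1 ≤ i₀) (h2 : i₀ < cs.length)
    (hsc : pvScoreA qws cs L 0 < pvScoreA qws cs L (i₀ : Int)) :
    ∃ bN : Nat, 1 ≤ bN ∧
      ((PySem.List.pyRange 0 ((cs.length : Int) - L)).foldl
        (fun (st : Int × Int) i =>
          if st.2 < pvScoreA qws cs L i then (i, pvScoreA qws cs L i) else st) (0, 0)).1 = (bN : Int) ∧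
      0 < pvScoreA qws cs L (bN : Int) := by
  rw [PySem.List.pyRange_one]
  have hM : ∃ M', (((cs.length : Int) - L) - 0).toNat = M' + 1 := by
    refine ⟨(((cs.length : Int) - L) - 0).toNat - 1, ?_⟩
    have : (0 : Int) ≤ (cs.length : Int) := Int.natCast_nonneg _
    omega
  obtain ⟨M', hM⟩ := hM
  rw [hM, List.range_succ_eq_map]
  simp only [List.map_cons, List.foldl_cons, zero_add, Nat.cast_zero]
  have hmem : ((i₀ : Nat) : Int) ∈ ((List.range M').map Nat.succ).map (fun k => ((k : Nat) : Int)) := by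
    refine List.mem_map.mpr ⟨i₀, List.mem_map.mpr ⟨i₀ - 1, List.mem_range.mpr (by omega), by omega⟩, rfl⟩
  have key : ∀ st0 : Int × Int, st0.1 = 0 → st0.2 < pvScoreA qws cs L (i₀ : Int) → 0 ≤ st0.2 →
      ∃ bN : Nat, 1 ≤ bN ∧
        ((((List.range M').map Nat.succ).map (fun k => ((k : Nat) : Int))).foldl
          (fun (st : Int × Int) i =>
            if st.2 < pvScoreA qws cs L i then (i, pvScoreA qws cs L i) else st) st0).1 = (bN : Int) ∧
        0 < pvScoreA qws cs L (bN : Int) := by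
    intro st0 hst01 hst02 hst03
    have hfstmem := pvFoldA_upd qws cs L _ st0 ⟨(i₀ : Int), hmem, hst02⟩
    obtain ⟨k, hk, hkeq⟩ := List.mem_map.mp hfstmem
    obtain ⟨k', _, rfl⟩ := List.mem_map.mp hk
    simp only [Nat.succ_eq_add_one] at hkeq
    refine ⟨k' + 1, by omega, hkeq.symm, ?_⟩
    rcases pvFoldA_snd_eq qws cs L (((List.range M').map Nat.succ).map (fun k => ((k : Nat) : Int))) st0
      with hcase | ⟨hsndeq, _⟩
    · exfalso
      rw [hcase] at hkeq
      rw [hst01] at hkeq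
      omega
    · have hge := pvFoldA_ge qws cs L _ st0 _ hmem
      rw [hkeq, ← hsndeq]
      omega
  by_cases h0 : (0 : Int) < pvScoreA qws cs L 0
  · rw [if_pos (by simpa using h0)]
    exact key ((0 : Int), pvScoreA qws cs L 0) rfl (by simpa using hsc) (le_of_lt h0)
  · rw [if_neg (by simpa using h0)]
    have h00 := pvScoreA_nonneg qws cs L 0
    exact key ((0 : Int), (0 : Int)) rfl (by omega) (le_refl _)

lemma pv_clamp_facts (n bN : Nat) (L : Int) (hL : L < 0)
    (hpos : 0 < PySem.List.clampIdx n ((bN : Int) + L) - PySem.List.clampIdx n (bN : Int)) :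
    PySem.List.clampIdx n ((bN : Int) + L) - PySem.List.clampIdx n (bN : Int) = ((n : Int) + L).toNat ∧
    (bN : Int) + L < 0 ∧ 1 ≤ (n : Int) + L := by
  simp only [PySem.List.clampIdx] at hpos ⊢
  split_ifs at hpos ⊢ <;> omega

lemma pv_slice0_len (cs : List Char) (L : Int) (hL : L < 0) :
    (PySem.List.slice cs (some (0 : Int)) (some ((0 : Int) + L))).length = ((cs.length : Int) + L).toNat := by
  rw [PySem.List.length_slice]
  simp only [PySem.List.clampIdx, zero_add]
  split_ifs <;> omega

-- ===== VERDICT (by name: the statement is the Claim_ definition above) =====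
theorem generate_content_snippet_py_spec : Claim_unchanged_generate_content_snippet_py := by
  intro query content max_length hDom
  unfold Spec_generate_content_snippet_py
  intro hnD
  simp only [generate_content_snippet_py, generate_content_snippet_py_alt]
  rcases Int.lt_or_le max_length 0 with hL | hL
  · -- negative max_length, outside D_: both folds keep best_start = 0
    have hmono : ∀ iN : Nat,
        pvScoreA ((PySem.Chars.split₀ query.toList).map PySem.Chars.lower) content.toList max_length (iN : Int)
          ≤ pvScoreA ((PySem.Chars.split₀ query.toList).map PySem.Chars.lower) content.toList max_length 0 := by
      intro iN
      by_cases hb : iN < min (-max_length).toNat content.toList.length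
      · have hnot : ¬ (pvHits query (pvWrapWin content max_length iN)
            > pvHits query (pvWrapWin content max_length 0)) :=
          fun hgt => hnD ⟨hL, iN, hb, hgt⟩
        have h0 := pvScoreA_eq_hits query content max_length 0 (Nat.zero_le _) (by omega)
        rw [Nat.cast_zero] at h0
        rw [pvScoreA_eq_hits query content max_length iN (by omega) (by omega), h0]
        exact_mod_cast not_lt.mp hnot
      · apply pvScoreA_mono
        intro w hw hwin
        rw [pv_lower_slice, pv_slice_neg_nil (PySem.Chars.lower content.toList) max_length iN hL
          (by rw [pv_length_lower]; omega)] at hwin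
        have : w = [] := List.infix_nil.mp ((PySem.Chars.isIn_iff_infix _ _).mp hwin)
        subst this
        exact PySem.Chars.isIn_nil _
    have hA1 := pvFoldA_neg ((PySem.Chars.split₀ query.toList).map PySem.Chars.lower)
      content.toList max_length hL hmono
    obtain ⟨ptrs', hB⟩ := pvFoldB_neg ((PySem.Chars.split₀ query.toList).map PySem.Chars.lower)
      (((PySem.Chars.split₀ query.toList).map PySem.Chars.lower).map
        (fun w => pvOccs (PySem.Chars.lower content.toList) w))
      max_length hL (PySem.List.pyRange 0 ((content.toList.length : Int) - max_length)) 0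
      (List.replicate ((PySem.Chars.split₀ query.toList).map PySem.Chars.lower).length 0)
    rw [hB, hA1]
  · -- 0 ≤ max_length: the folds agree pointwise
    have hLcast : max_length = ((max_length.toNat : Nat) : Int) := (Int.toNat_of_nonneg hL).symm
    rw [hLcast, PySem.List.pyRange_one]
    have hf : (fun (k : Nat) => (0 : Int) + (k : Int)) = (Nat.cast : Nat → Int) := by
      funext k; rw [zero_add]
    rw [hf]
    have hbound : ∀ iN ∈ List.range ((((content.toList.length : Int) - (max_length.toNat : Int)) - 0).toNat),
        iN + max_length.toNat ≤ content.toList.length := by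
      intro iN hiN
      rw [List.mem_range] at hiN
      omega
    have hpw : (List.range ((((content.toList.length : Int) - (max_length.toNat : Int)) - 0).toNat)).Pairwise (· ≤ ·) :=
      List.Pairwise.imp le_of_lt List.pairwise_lt_range
    have hinv : ∀ iN ∈ List.range ((((content.toList.length : Int) - (max_length.toNat : Int)) - 0).toNat),
        pvInv (((PySem.Chars.split₀ query.toList).map PySem.Chars.lower).map
            (fun w => pvOccs (PySem.Chars.lower content.toList) w))
          (List.replicate ((PySem.Chars.split₀ query.toList).map PySem.Chars.lower).length 0) (iN : Int) := by
      intro iN _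
      rw [show ((PySem.Chars.split₀ query.toList).map PySem.Chars.lower).length
          = (((PySem.Chars.split₀ query.toList).map PySem.Chars.lower).map
              (fun w => pvOccs (PySem.Chars.lower content.toList) w)).length by
        simp [List.length_map]]
      exact pvInv_replicate _ _
    obtain ⟨ptrs', hfold⟩ := pvFold_eq content.toList max_length.toNat
      ((PySem.Chars.split₀ query.toList).map PySem.Chars.lower)
      (((PySem.Chars.split₀ query.toList).map PySem.Chars.lower).map
        (fun w => pvOccs (PySem.Chars.lower content.toList) w)) rfl
      (List.range ((((content.toList.length : Int) - (max_length.toNat : Int)) - 0).toNat)) 0 0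
      (List.replicate ((PySem.Chars.split₀ query.toList).map PySem.Chars.lower).length 0)
      hbound hpw hinv
    rw [hfold]
theorem generate_content_snippet_py_changed : Claim_changed_generate_content_snippet_py := by
  unfold Claim_changed_generate_content_snippet_py; decide

theorem generate_content_snippet_py_tight : Claim_exact_generate_content_snippet_py := by
  intro query content max_length hDom hD
  obtain ⟨hL, i₀, hi₀, hgt⟩ := hD
  intro heq
  simp only [generate_content_snippet_py, generate_content_snippet_py_alt] at heq
  -- i₀ is a genuine wrap-around index and its window beats the prefix window in score
  have hi1 : 1 ≤ i₀ := by
    by_contra h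
    have : i₀ = 0 := by omega
    rw [this] at hgt
    omega
  have h0 := pvScoreA_eq_hits query content max_length 0 (Nat.zero_le _) (by omega)
  rw [Nat.cast_zero] at h0
  have hsc : pvScoreA ((PySem.Chars.split₀ query.toList).map PySem.Chars.lower) content.toList max_length 0
      < pvScoreA ((PySem.Chars.split₀ query.toList).map PySem.Chars.lower) content.toList max_length (i₀ : Int) := by
    rw [h0, pvScoreA_eq_hits query content max_length i₀ (by omega) (by omega)]
    exact_mod_cast hgt
  obtain ⟨bN, hbN1, hfst, hSb⟩ := pvFoldA_posbest
    ((PySem.Chars.split₀ query.toList).map PySem.Chars.lower) content.toList max_length hL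
    i₀ hi1 (by omega) hsc
  -- the best window is nonempty
  have hne : PySem.List.slice content.toList (some (bN : Int)) (some ((bN : Int) + max_length)) ≠ [] := by
    intro hnil
    unfold pvScoreA at hSb
    rw [PySem.List.sum_map_ite_one_zero] at hSb
    have : 0 < ((PySem.Chars.split₀ query.toList).map PySem.Chars.lower).countP
        (fun w => PySem.Chars.isIn w (PySem.Chars.lower (PySem.List.slice content.toList
          (some (bN : Int)) (some ((bN : Int) + max_length))))) := by exact_mod_cast hSb
    obtain ⟨w, hw, hpw⟩ := List.countP_pos_iff.mp this
    rw [hnil] at hpw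
    simp only [PySem.Chars.lower, List.map_nil] at hpw
    have : w = [] := List.infix_nil.mp ((PySem.Chars.isIn_iff_infix _ _).mp hpw)
    exact pv_words_ne_nil query.toList w hw this
  have hpos : 0 < (PySem.List.slice content.toList (some (bN : Int)) (some ((bN : Int) + max_length))).length :=
    List.length_pos_iff.mpr hne
  rw [PySem.List.length_slice] at hpos
  obtain ⟨hwlen, hbL, hnL⟩ := pv_clamp_facts content.toList.length bN max_length hL hpos
  -- B's fold keeps best_start = 0
  obtain ⟨ptrs', hB⟩ := pvFoldB_neg ((PySem.Chars.split₀ query.toList).map PySem.Chars.lower)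
    (((PySem.Chars.split₀ query.toList).map PySem.Chars.lower).map
      (fun w => pvOccs (PySem.Chars.lower content.toList) w))
    max_length hL (PySem.List.pyRange 0 ((content.toList.length : Int) - max_length)) 0
    (List.replicate ((PySem.Chars.split₀ query.toList).map PySem.Chars.lower).length 0)
  rw [hB, hfst] at heq
  rw [if_pos (by exact_mod_cast Nat.lt_of_lt_of_le Nat.zero_lt_one hbN1 : (0 : Int) < (bN : Int))] at heq
  rw [if_pos (by omega : (bN : Int) + max_length < (content.toList.length : Int))] at heq
  simp only [lt_irrefl, if_false] at heq
  rw [if_pos (by omega : (0 : Int) + max_length < (content.toList.length : Int))] at heq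
  -- compare lengths: A carries both ellipses, B only the trailing one
  have hlist := congrArg String.toList heq
  rw [String.toList_ofList, String.toList_ofList] at hlist
  have hlen := congrArg List.length hlist
  simp only [List.length_append, List.length_cons] at hlen
  rw [PySem.List.length_slice, hwlen, pv_slice0_len content.toList max_length hL] at hlen
  omega
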